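-- pv_equiv track=rewrite | github.com/adarsh0014/Live-Meeting-Summarizer-Application | appF.py | normalize_speakers
-- ===== SOURCE A (Python) =====
-- def normalize_speakers(text: str) -> str:
--     speaker_map = {
--         "SPEAKER_00": "Mentor",
--         "SPEAKER_01": "Participant 1",
--         "SPEAKER_02": "Participant 2",
--     }
--     for k, v in speaker_map.items():
--         text = text.replace(k, v)
--     return text
-- ===== SOURCE B (Python) =====
-- def normalize_speakers(text: str) -> str:
--     speaker_map = {
--         "SPEAKER_00": "Mentor",
--         "SPEAKER_01": "Participant 1",
--         "SPEAKER_02": "Participant 2",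
--     }
--     out = []
--     i = 0
--     n = len(text)
--     while i < n:
--         repl = speaker_map.get(text[i:i + 10])
--         if repl is not None:
--             out.append(repl)
--             i += 10
--         else:
--             out.append(text[i])
--             i += 1
--     return "".join(out)
-- ===== Notes on version B (the rewrite author's own statement) =====
-- stated objective: alternative
-- what changed: A makes three independent str.replace passes over the text, one per speaker tag; B makes a single left-to-right scan that at each position looks the 10-character window up in the speaker map and emits either the replacement (skipping 10 chars) or the current character.
import Mathlib
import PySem

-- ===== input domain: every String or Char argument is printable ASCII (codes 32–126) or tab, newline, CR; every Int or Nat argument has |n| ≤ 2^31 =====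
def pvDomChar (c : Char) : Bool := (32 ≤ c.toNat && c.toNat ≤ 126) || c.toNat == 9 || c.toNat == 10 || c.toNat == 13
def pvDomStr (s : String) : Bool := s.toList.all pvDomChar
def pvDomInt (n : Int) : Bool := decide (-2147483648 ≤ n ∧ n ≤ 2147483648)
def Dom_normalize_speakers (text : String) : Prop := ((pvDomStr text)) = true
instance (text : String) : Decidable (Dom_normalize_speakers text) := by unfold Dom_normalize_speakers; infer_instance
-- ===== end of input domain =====

-- B replaces A's three sequential str.replace passes by one left-to-right scan with a map
-- lookup on the 10-character window (objective: alternative single-pass strategy, same O(n) cost).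

-- ===== PORT A =====
-- the speaker_map dict of A, iterated in insertion order
def nsItemsA : PySem.Dict String String :=
  ⟨[("SPEAKER_00", "Mentor"), ("SPEAKER_01", "Participant 1"), ("SPEAKER_02", "Participant 2")]⟩

-- for k, v in speaker_map.items(): text = text.replace(k, v)
def normalize_speakers (text : String) : String :=
  List.foldl (fun t kv => PySem.Str.replace t kv.1 kv.2) text nsItemsA.items

-- ===== PORT B =====
-- the speaker_map dict of B, keyed by the 10-character window (strings as char lists)
def nsMapB : PySem.Dict (List Char) (List Char) :=
  ⟨[("SPEAKER_00".toList, "Mentor".toList),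
    ("SPEAKER_01".toList, "Participant 1".toList),
    ("SPEAKER_02".toList, "Participant 2".toList)]⟩

-- B's while loop: repl = speaker_map.get(text[i:i+10]); emit repl and skip 10, or emit text[i]
def scanChars : List Char → List Char
  | [] => []
  | c :: t =>
    match PySem.Dict.get? nsMapB (List.take 10 (c :: t)) with
    | some v => v ++ scanChars (List.drop 9 t)
    | none => c :: scanChars t
termination_by l => l.length
decreasing_by
  · simp only [List.length_drop, List.length_cons]; omega
  · simp only [List.length_cons]; omega

def normalize_speakers_alt (text : String) : String :=
  String.ofList (scanChars text.toList)

-- ===== PRECONDITION & SPEC =====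
def Spec_normalize_speakers (text : String) (out : String) : Prop := out = normalize_speakers_alt text
instance (text : String) (out : String) : Decidable (Spec_normalize_speakers text out) := by unfold Spec_normalize_speakers; infer_instance

-- ===== CLAIM (what is proved, stated in full; the proofs are below) =====
def Claim_equal_normalize_speakers : Prop := ∀ (text : String), Dom_normalize_speakers text → Spec_normalize_speakers text (normalize_speakers text)

-- ===== LEMMAS AND PROOFS =====

-- key/value literals (key = head :: tail, the shape the replace scanner recurses on)
def ksK0 : List Char := "PEAKER_00".toList
def ksK1 : List Char := "PEAKER_01".toList
def ksK2 : List Char := "PEAKER_02".toList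
def keyK0 : List Char := 'S' :: ksK0
def keyK1 : List Char := 'S' :: ksK1
def keyK2 : List Char := 'S' :: ksK2
def valV0 : List Char := "Mentor".toList
def valV1 : List Char := "Participant 1".toList
def valV2 : List Char := "Participant 2".toList

-- fuel-free form of PySem.Chars.replace's scanner (key = a :: ks is nonempty)
def rep (a : Char) (ks v : List Char) : List Char → List Char
  | [] => []
  | c :: t =>
    if (a :: ks).isPrefixOf (c :: t) then v ++ rep a ks v (List.drop ks.length t)
    else c :: rep a ks v t
termination_by l => l.length
decreasing_by
  · simp only [List.length_drop, List.length_cons]; omega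
  · simp only [List.length_cons]; omega

lemma rep_nil (a : Char) (ks v : List Char) : rep a ks v [] = [] := by simp [rep]

lemma rep_cons (a : Char) (ks v : List Char) (c : Char) (t : List Char) :
    rep a ks v (c :: t) =
      if (a :: ks).isPrefixOf (c :: t) then v ++ rep a ks v (List.drop ks.length t)
      else c :: rep a ks v t := by
  simp only [rep]

lemma rep_skip (a : Char) (ks v : List Char) (c : Char) (t : List Char)
    (h : ¬ (a :: ks) <+: (c :: t)) : rep a ks v (c :: t) = c :: rep a ks v t := by
  rw [rep_cons, if_neg]
  simpa [List.isPrefixOf_iff_prefix] using h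

lemma rep_match (a : Char) (ks v r : List Char) :
    rep a ks v ((a :: ks) ++ r) = v ++ rep a ks v r := by
  rw [show (a :: ks) ++ r = a :: (ks ++ r) from rfl, rep_cons, if_pos, List.drop_left]
  simp [List.isPrefixOf_iff_prefix, List.prefix_append]

-- the scanner passes unchanged over a block q in which no occurrence of the key can start
lemma rep_pass (a : Char) (ks v : List Char) (q : List Char)
    (hq : ∀ s ∈ q.tails, s ≠ [] → ¬ (a :: ks) <+: s ∧ ¬ s <+: (a :: ks)) :
    ∀ r, rep a ks v (q ++ r) = q ++ rep a ks v r := by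
  induction q with
  | nil => intro r; simp
  | cons c qt ih =>
    intro r
    have hself := hq (c :: qt) (by simp [List.mem_tails]) (by simp)
    have hnp : ¬ (a :: ks) <+: (c :: qt) ++ r := by
      intro h
      rcases List.prefix_or_prefix_of_prefix h (List.prefix_append (c :: qt) r) with h' | h'
      · exact hself.1 h'
      · exact hself.2 h'
    rw [List.cons_append, rep_skip a ks v c (qt ++ r) (by simpa using hnp),
        ih (fun s hs hne => hq s (by
          rw [List.mem_tails] at hs ⊢
          exact hs.trans (List.suffix_cons c qt)) hne) r]
    rfl

-- a prefix p of the scanner's output that cannot begin inside the replacement v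
-- was already a prefix of the input
lemma prefix_rep (a : Char) (ks v : List Char) :
    ∀ (l p : List Char),
      (∀ s ∈ p.tails, s ≠ [] → ¬ s <+: v ∧ ¬ v <+: s) →
      p <+: rep a ks v l → p <+: l := by
  intro l
  induction l with
  | nil => intro p _ h; simpa [rep_nil] using h
  | cons c t ih =>
    intro p hp h
    cases p with
    | nil => exact List.nil_prefix
    | cons x p' =>
      by_cases hpre : (a :: ks) <+: (c :: t)
      · obtain ⟨r, hr⟩ := hpre
        rw [← hr] at h ⊢
        rw [rep_match] at h
        have hself := hp (x :: p') (by simp [List.mem_tails]) (by simp)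
        rcases List.prefix_or_prefix_of_prefix h (List.prefix_append v _) with h' | h'
        · exact absurd h' hself.1
        · exact absurd h' hself.2
      · rw [rep_skip a ks v c t hpre] at h
        rcases List.cons_prefix_cons.1 h with ⟨rfl, h'⟩
        exact List.cons_prefix_cons.2 ⟨rfl, ih p' (fun s hs hne => hp s (by
          rw [List.mem_tails] at hs ⊢
          exact hs.trans (List.suffix_cons x p')) hne) h'⟩

-- PySem.Chars.replace computes rep (for a nonempty key)
lemma go_eq (a : Char) (ks v : List Char) :
    ∀ (fuel : Nat) (l acc : List Char), l.length ≤ fuel →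
      PySem.Chars.replace.go (a :: ks) v fuel l acc = acc.reverse ++ rep a ks v l := by
  intro fuel
  induction fuel with
  | zero =>
    intro l acc h
    have hl : l = [] := by cases l with
      | nil => rfl
      | cons c t => simp at h
    subst hl
    simp [PySem.Chars.replace.go, rep_nil]
  | succ n ihn =>
    intro l acc h
    cases l with
    | nil => simp [PySem.Chars.replace.go, rep_nil]
    | cons c t =>
      simp only [PySem.Chars.replace.go]
      by_cases hp : (a :: ks).isPrefixOf (c :: t)
      · rw [if_pos hp]
        rw [ihn (List.drop (a :: ks).length (c :: t)) (v.reverse ++ acc)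
              (by simp only [List.length_drop, List.length_cons] at *; omega)]
        rw [rep_cons, if_pos hp]
        simp [List.length_cons, List.drop_succ_cons, List.reverse_append, List.append_assoc]
      · rw [if_neg hp]
        rw [ihn t (c :: acc) (by simp only [List.length_cons] at h; omega)]
        rw [rep_cons, if_neg hp]
        simp

lemma replace_eq_rep (a : Char) (ks v s : List Char) :
    PySem.Chars.replace s (a :: ks) v = rep a ks v s := by
  simp only [PySem.Chars.replace, List.isEmpty_cons, Bool.false_eq_true, if_false]
  simpa using go_eq a ks v s.length s [] (le_refl _)

-- scanChars equations
lemma scan_nil : scanChars [] = [] := by simp [scanChars]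

lemma scan_match0 (r : List Char) : scanChars (keyK0 ++ r) = valV0 ++ scanChars r := by
  rw [show keyK0 ++ r = 'S' :: (ksK0 ++ r) from rfl]
  simp only [scanChars]
  rw [show List.take 10 ('S' :: (ksK0 ++ r)) = keyK0 from by
        rw [show ('S' :: (ksK0 ++ r)) = keyK0 ++ r from rfl]
        exact List.take_left' (by decide)]
  rw [show PySem.Dict.get? nsMapB keyK0 = some valV0 from by decide]
  rw [List.drop_left' (show ksK0.length = 9 from by decide)]

lemma scan_match1 (r : List Char) : scanChars (keyK1 ++ r) = valV1 ++ scanChars r := by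
  rw [show keyK1 ++ r = 'S' :: (ksK1 ++ r) from rfl]
  simp only [scanChars]
  rw [show List.take 10 ('S' :: (ksK1 ++ r)) = keyK1 from by
        rw [show ('S' :: (ksK1 ++ r)) = keyK1 ++ r from rfl]
        exact List.take_left' (by decide)]
  rw [show PySem.Dict.get? nsMapB keyK1 = some valV1 from by decide]
  rw [List.drop_left' (show ksK1.length = 9 from by decide)]

lemma scan_match2 (r : List Char) : scanChars (keyK2 ++ r) = valV2 ++ scanChars r := by
  rw [show keyK2 ++ r = 'S' :: (ksK2 ++ r) from rfl]
  simp only [scanChars]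
  rw [show List.take 10 ('S' :: (ksK2 ++ r)) = keyK2 from by
        rw [show ('S' :: (ksK2 ++ r)) = keyK2 ++ r from rfl]
        exact List.take_left' (by decide)]
  rw [show PySem.Dict.get? nsMapB keyK2 = some valV2 from by decide]
  rw [List.drop_left' (show ksK2.length = 9 from by decide)]

lemma scan_nomatch (c : Char) (t : List Char)
    (h0 : ¬ keyK0 <+: (c :: t)) (h1 : ¬ keyK1 <+: (c :: t)) (h2 : ¬ keyK2 <+: (c :: t)) :
    scanChars (c :: t) = c :: scanChars t := by
  simp only [scanChars]
  have hn : PySem.Dict.get? nsMapB (List.take 10 (c :: t)) = none := by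
    have e0 : List.take 10 (c :: t) ≠ "SPEAKER_00".toList := fun he => h0 (by
      rw [show keyK0 = "SPEAKER_00".toList from rfl, ← he]; exact List.take_prefix 10 (c :: t))
    have e1 : List.take 10 (c :: t) ≠ "SPEAKER_01".toList := fun he => h1 (by
      rw [show keyK1 = "SPEAKER_01".toList from rfl, ← he]; exact List.take_prefix 10 (c :: t))
    have e2 : List.take 10 (c :: t) ≠ "SPEAKER_02".toList := fun he => h2 (by
      rw [show keyK2 = "SPEAKER_02".toList from rfl, ← he]; exact List.take_prefix 10 (c :: t))
    have key : ('S' = c → ¬['P','E','A','K','E','R','_','0','0'] = List.take 9 t) ∧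
               ('S' = c → ¬['P','E','A','K','E','R','_','0','1'] = List.take 9 t) ∧
               ('S' = c → ¬['P','E','A','K','E','R','_','0','2'] = List.take 9 t) := by
      refine ⟨fun hc he => e0 ?_, fun hc he => e1 ?_, fun hc he => e2 ?_⟩ <;>
        (subst hc
         rw [show List.take 10 ('S' :: t) = 'S' :: List.take 9 t from rfl, ← he]
         try rfl)
    simpa [PySem.Dict.get?, nsMapB] using key
  rw [hn]

-- the composition of the three replace scans equals the single-pass scan
lemma main_eq : ∀ (n : Nat) (l : List Char), l.length ≤ n →
    rep 'S' ksK2 valV2 (rep 'S' ksK1 valV1 (rep 'S' ksK0 valV0 l)) = scanChars l := by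
  intro n
  induction n with
  | zero =>
    intro l h
    have hl : l = [] := by cases l with
      | nil => rfl
      | cons c t => simp at h
    subst hl
    simp [rep_nil, scan_nil]
  | succ n ihn =>
    intro l hl
    by_cases h0 : keyK0 <+: l
    · obtain ⟨r, rfl⟩ := h0
      rw [show keyK0 = ('S' :: ksK0) from rfl, rep_match,
          rep_pass 'S' ksK1 valV1 valV0 (by decide) _,
          rep_pass 'S' ksK2 valV2 valV0 (by decide) _,
          ihn r (by
            have h10 : keyK0.length = 10 := by decide
            rw [List.length_append, h10] at hl; omega),
          ← scan_match0]
      rfl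
    · by_cases h1 : keyK1 <+: l
      · obtain ⟨r, rfl⟩ := h1
        rw [rep_pass 'S' ksK0 valV0 keyK1 (by decide) r,
            show keyK1 = ('S' :: ksK1) from rfl, rep_match,
            rep_pass 'S' ksK2 valV2 valV1 (by decide) _,
            ihn r (by
              have h10 : keyK1.length = 10 := by decide
              rw [List.length_append, h10] at hl; omega),
            ← scan_match1]
        rfl
      · by_cases h2 : keyK2 <+: l
        · obtain ⟨r, rfl⟩ := h2
          rw [rep_pass 'S' ksK0 valV0 keyK2 (by decide) r,
              rep_pass 'S' ksK1 valV1 keyK2 (by decide) _,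
              show keyK2 = ('S' :: ksK2) from rfl, rep_match,
              ihn r (by
                have h10 : keyK2.length = 10 := by decide
                rw [List.length_append, h10] at hl; omega),
              ← scan_match2]
          rfl
        · cases l with
          | nil => simp [rep_nil, scan_nil]
          | cons c t =>
            have e0 : rep 'S' ksK0 valV0 (c :: t) = c :: rep 'S' ksK0 valV0 t :=
              rep_skip _ _ _ _ _ h0
            have h1' : ¬ keyK1 <+: (c :: rep 'S' ksK0 valV0 t) := fun h => h1 (by
              rw [← e0] at h
              exact prefix_rep 'S' ksK0 valV0 _ keyK1 (by decide) h)
            have e1 : rep 'S' ksK1 valV1 (c :: rep 'S' ksK0 valV0 t)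
                = c :: rep 'S' ksK1 valV1 (rep 'S' ksK0 valV0 t) :=
              rep_skip _ _ _ _ _ h1'
            have h2' : ¬ keyK2 <+: (c :: rep 'S' ksK1 valV1 (rep 'S' ksK0 valV0 t)) := fun h => h2 (by
              rw [← e1, ← e0] at h
              exact prefix_rep 'S' ksK0 valV0 _ keyK2 (by decide)
                (prefix_rep 'S' ksK1 valV1 _ keyK2 (by decide) h))
            have e2 := rep_skip 'S' ksK2 valV2 c (rep 'S' ksK1 valV1 (rep 'S' ksK0 valV0 t)) h2'
            rw [e0, e1, e2, ihn t (by simp only [List.length_cons] at hl; omega),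
                scan_nomatch c t h0 h1 h2]

-- ===== VERDICT (by name: the statement is the Claim_ definition above) =====
theorem normalize_speakers_spec : Claim_equal_normalize_speakers := by
  unfold Claim_equal_normalize_speakers
  intro text _
  unfold Spec_normalize_speakers normalize_speakers normalize_speakers_alt nsItemsA
  simp only [List.foldl]
  refine String.toList_inj.mp ?_
  rw [PySem.Str.toList_replace, PySem.Str.toList_replace, PySem.Str.toList_replace,
      String.toList_ofList]
  have r0 : ∀ s, PySem.Chars.replace s ['S','P','E','A','K','E','R','_','0','0'] "Mentor".toList
      = rep 'S' ksK0 valV0 s := fun s => replace_eq_rep 'S' ksK0 valV0 s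
  have r1 : ∀ s, PySem.Chars.replace s "SPEAKER_01".toList "Participant 1".toList
      = rep 'S' ksK1 valV1 s := fun s => replace_eq_rep 'S' ksK1 valV1 s
  have r2 : ∀ s, PySem.Chars.replace s "SPEAKER_02".toList "Participant 2".toList
      = rep 'S' ksK2 valV2 s := fun s => replace_eq_rep 'S' ksK2 valV2 s
  rw [r0, r1, r2]
  simpa using main_eq text.toList.length text.toList (le_refl _)
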